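-- pv_equiv track=rewrite | github.com/ShangzhiXu/Vulture | PathDiff/ChunkExtraction.py | find_smallest_range
-- ===== SOURCE A (Python) =====
-- def find_smallest_range(ranges, number):
--     ranges = [(r[0], int(r[1]), int(r[2])) for r in ranges]
--     number = int(number)
--     # Find ranges containing the number
--     containing_ranges = [r for r in ranges if int(r[1]) <= number <= int(r[2])]
--
--     # Sort the ranges by their size (end - start) and take the smallest one if any exist
--     if containing_ranges:
--         smallest_range = min(containing_ranges, key=lambda x: x[2] - x[1])
--         return smallest_range
--     else:
--         return None
-- ===== SOURCE B (Python) =====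
-- def find_smallest_range(ranges, number):
--     number = int(number)
--     containing = [(r[0], int(r[1]), int(r[2])) for r in ranges
--                   if int(r[1]) <= number <= int(r[2])]
--     containing.sort(key=lambda t: t[2] - t[1])
--     return containing[0] if containing else None
-- ===== Notes on version B (the rewrite author's own statement) =====
-- stated objective: alternative
-- what changed: Replaces A's filter-then-min selection by a sort-based selection: the containing ranges are stably sorted by width and the head of the sorted list is returned; stability of list.sort preserves min's first-minimum tie behaviour.
import Mathlib
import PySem

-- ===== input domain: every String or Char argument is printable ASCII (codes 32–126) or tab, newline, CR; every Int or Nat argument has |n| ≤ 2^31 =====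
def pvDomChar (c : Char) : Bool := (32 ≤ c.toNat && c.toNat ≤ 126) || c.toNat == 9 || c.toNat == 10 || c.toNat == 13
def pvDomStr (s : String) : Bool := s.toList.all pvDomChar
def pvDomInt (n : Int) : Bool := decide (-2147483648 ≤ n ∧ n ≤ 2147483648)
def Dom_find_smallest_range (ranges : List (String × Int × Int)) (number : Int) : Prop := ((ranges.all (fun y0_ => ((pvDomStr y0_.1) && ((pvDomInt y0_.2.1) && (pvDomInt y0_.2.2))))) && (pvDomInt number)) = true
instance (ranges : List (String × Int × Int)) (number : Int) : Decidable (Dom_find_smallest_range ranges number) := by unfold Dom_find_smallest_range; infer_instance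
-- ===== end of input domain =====

-- B replaces A's filter-then-min selection by a sort-based selection: stably sort the containing ranges by width and return the head (alternative algorithm, same result incl. first-tie behaviour).


-- ===== PORT A =====
-- ranges' entries are already Int, so int(r[1])/int(r[2])/int(number) are identities.
def find_smallest_range (ranges : List (String × Int × Int)) (number : Int) : Option (String × Int × Int) :=
  let ranges' := ranges.map (fun r => (r.1, r.2.1, r.2.2))
  let containing := ranges'.filter (fun r => decide (r.2.1 ≤ number ∧ number ≤ r.2.2))
  if containing ≠ [] then
    PySem.List.min? containing (fun x => x.2.2 - x.2.1)
  else
    none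

-- ===== PORT B =====
-- B: single comprehension filtering the containing ranges, stable sort by width, return head (or None).
def find_smallest_range_alt (ranges : List (String × Int × Int)) (number : Int) : Option (String × Int × Int) :=
  let containing :=
    (ranges.filter (fun r => decide (r.2.1 ≤ number ∧ number ≤ r.2.2))).map
      (fun r => (r.1, r.2.1, r.2.2))
  (PySem.List.sorted containing (fun t => t.2.2 - t.2.1)).head?

-- ===== PRECONDITION & SPEC =====
def Spec_find_smallest_range (ranges : List (String × Int × Int)) (number : Int) (out : Option (String × Int × Int)) : Prop := out = find_smallest_range_alt ranges number
instance (ranges : List (String × Int × Int)) (number : Int) (out : Option (String × Int × Int)) : Decidable (Spec_find_smallest_range ranges number out) := by unfold Spec_find_smallest_range; infer_instance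

-- ===== CLAIM (what is proved, stated in full; the proofs are below) =====
def Claim_equal_find_smallest_range : Prop := ∀ (ranges : List (String × Int × Int)) (number : Int), Dom_find_smallest_range ranges number → Spec_find_smallest_range ranges number (find_smallest_range ranges number)

-- ===== LEMMAS AND PROOFS =====

theorem pv_insertBy_cons {α : Type} (before : α → α → Bool) (x y : α) (t : List α) :
    PySem.List.insertBy before x (y :: t)
      = if before x y then x :: y :: t else y :: PySem.List.insertBy before x t := rfl
theorem pv_head?_insertBy {α : Type} (key : α → Int) (x : α) (ys : List α) :
    (PySem.List.insertBy (fun a b => decide (key a < key b)) x ys).head?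
      = match ys.head? with
        | none => some x
        | some y => if key x < key y then some x else some y := by
  cases ys with
  | nil => rfl
  | cons y t =>
    rw [pv_insertBy_cons]
    by_cases h : key x < key y <;> simp [h]
theorem pv_head?_sorted_eq_min? {α : Type} (key : α → Int) (xs : List α) :
    (PySem.List.sorted xs key).head? = PySem.List.min? xs key := by
  induction xs using List.reverseRecOn with
  | nil => rfl
  | append_singleton l x ih =>
    simp only [PySem.List.sorted, PySem.List.min?, List.foldl_append, List.foldl_cons,
      List.foldl_nil, if_neg (by simp : ¬ (false = true))] at ih ⊢
    rw [pv_head?_insertBy, ih]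
    generalize List.foldl
        (fun acc x => match acc with
          | none => some x
          | some m => if key x < key m then some x else some m) none l = o
    cases o <;> rfl

-- ===== VERDICT (by name: the statement is the Claim_ definition above) =====
theorem find_smallest_range_spec : Claim_equal_find_smallest_range := by
  intro ranges number _
  unfold Spec_find_smallest_range find_smallest_range find_smallest_range_alt
  rw [pv_head?_sorted_eq_min?]
  have hid : (fun (r : String × Int × Int) => (r.1, r.2.1, r.2.2)) = id := by
    funext r; rfl
  simp only [hid, List.map_id]
  split_ifs with hc
  · rfl
  · rw [not_not] at hc
    rw [hc]
    rfl
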